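-- pv_equiv track=rewrite | github.com/DavidJHub/bitFlip | app.py | _highlight_sequence
-- ===== SOURCE A (Python) =====
-- def _wrap_sequence(seq: str, width: int = 60) -> list[str]:
--     return [seq[i : i + width] for i in range(0, len(seq), width)]
--
-- def _highlight_sequence(sequence: str, reference: str, width: int = 60) -> str:
--     """Return HTML with bases that changed highlighted in yellow."""
--
--     highlighted_lines: list[str] = []
--     for seq_chunk, ref_chunk in zip(_wrap_sequence(sequence, width), _wrap_sequence(reference, width)):
--         line_parts: list[str] = []
--         for base, ref_base in zip(seq_chunk, ref_chunk):
--             if base == ref_base: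
--                 line_parts.append(base)
--             else:
--                 line_parts.append(
--                     f"<span style='background-color:#ffef9f;color:#0f172a;padding:1px 2px;border-radius:3px;font-weight:600;'>{base}</span>"
--                 )
--         highlighted_lines.append("".join(line_parts))
--     return "<br>".join(highlighted_lines)
-- ===== SOURCE B (Python) =====
-- def _highlight_sequence(sequence: str, reference: str, width: int = 60) -> str:
--     """Return HTML with bases that changed highlighted in yellow."""
--     parts: list[str] = []
--     for i, (base, ref_base) in enumerate(zip(sequence, reference)):
--         if i > 0 and i % width == 0:
--             parts.append("<br>")
--         if base == ref_base:
--             parts.append(base)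
--         else:
--             parts.append(
--                 f"<span style='background-color:#ffef9f;color:#0f172a;padding:1px 2px;border-radius:3px;font-weight:600;'>{base}</span>"
--             )
--     return "".join(parts)
-- ===== Notes on version B (the rewrite author's own statement) =====
-- stated objective: simpler
-- what changed: Replaced the chunk-both-strings-then-nested-loop structure (helper _wrap_sequence, zip of chunk lists, inner per-chunk loop, two joins) by a single flat pass over enumerate(zip(sequence, reference)) that appends a literal '<br>' whenever i > 0 and i % width == 0, joined once.
-- outside the precondition, e.g. on _highlight_sequence('ab', 'ab', -1): A returns '', B returns 'a<br>b'; on _highlight_sequence('ab', 'ab', 0): A raises ValueError, B raises ZeroDivisionError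
import Mathlib
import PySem

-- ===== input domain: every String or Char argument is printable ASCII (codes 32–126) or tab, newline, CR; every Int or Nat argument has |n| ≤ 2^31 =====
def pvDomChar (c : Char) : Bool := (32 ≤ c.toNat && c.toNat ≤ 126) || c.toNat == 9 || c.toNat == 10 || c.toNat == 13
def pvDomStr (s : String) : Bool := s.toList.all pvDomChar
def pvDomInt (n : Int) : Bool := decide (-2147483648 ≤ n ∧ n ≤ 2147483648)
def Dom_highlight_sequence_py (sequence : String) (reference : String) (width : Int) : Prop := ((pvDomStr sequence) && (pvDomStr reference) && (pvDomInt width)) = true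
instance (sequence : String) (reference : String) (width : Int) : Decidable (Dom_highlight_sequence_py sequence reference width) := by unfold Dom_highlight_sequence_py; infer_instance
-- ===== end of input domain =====

-- B replaces A's chunk-then-nested-loop structure by a single flat pass over the zipped
-- pair of strings, inserting "<br>" at indices i with i > 0 and i % width == 0 (objective: simpler).

-- ===== PORT A =====
-- the highlight span around a single character (a string literal of the Python source)
def pvSpanOf (b : Char) : List Char :=
  "<span style='background-color:#ffef9f;color:#0f172a;padding:1px 2px;border-radius:3px;font-weight:600;'>".toList
    ++ [b] ++ "</span>".toList

-- _wrap_sequence: [seq[i : i + width] for i in range(0, len(seq), width)]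
def pvWrap (s : List Char) (width : Int) : List (List Char) :=
  (PySem.List.pyRange 0 (s.length : Int) width).map
    (fun i => PySem.List.slice s (some i) (some (i + width)))

def highlight_sequence_py (sequence : String) (reference : String) (width : Int) : String :=
  String.mk (PySem.Chars.join "<br>".toList
    (((pvWrap sequence.toList width).zip (pvWrap reference.toList width)).map
      (fun p => PySem.Chars.join []
        ((p.1.zip p.2).map (fun q => if q.1 = q.2 then [q.1] else pvSpanOf q.1)))))

-- ===== PORT B =====
-- the flat loop of Source B: parts accumulated over enumerate(zip(sequence, reference))
def pvAltGo (width : Int) (i : Nat) : List (Char × Char) → List (List Char)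
  | [] => []
  | (b, r) :: t =>
    (if 0 < i ∧ PySem.Int.mod (i : Int) width = 0 then ["<br>".toList] else []) ++
    ((if b = r then [b] else pvSpanOf b) :: pvAltGo width (i + 1) t)

def highlight_sequence_py_alt (sequence : String) (reference : String) (width : Int) : String :=
  String.mk (PySem.Chars.join [] (pvAltGo width 0 (sequence.toList.zip reference.toList)))

-- ===== PRECONDITION & SPEC =====
-- Pre_ excludes width ≤ 0: on width = 0 both programs raise (range step 0 / % 0); on negative
-- width A's empty-string result is an accident of range(0, len, width) being empty, a corner no
-- caller of a line-wrapping width would specify, and B emits the characters there.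
def Pre_highlight_sequence_py (sequence : String) (reference : String) (width : Int) : Prop := 1 ≤ width
instance (sequence : String) (reference : String) (width : Int) : Decidable (Pre_highlight_sequence_py sequence reference width) := by unfold Pre_highlight_sequence_py; infer_instance

def pvWitness_highlight_sequence_py : String × String × Int := ("ACGTAC", "AGGTAT", 2)

def Spec_highlight_sequence_py (sequence : String) (reference : String) (width : Int) (out : String) : Prop := out = highlight_sequence_py_alt sequence reference width
instance (sequence : String) (reference : String) (width : Int) (out : String) : Decidable (Spec_highlight_sequence_py sequence reference width out) := by unfold Spec_highlight_sequence_py; infer_instance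

-- ===== CLAIM (what is proved, stated in full; the proofs are below) =====
def Claim_equal_highlight_sequence_py : Prop := ∀ (sequence : String) (reference : String) (width : Int), Dom_highlight_sequence_py sequence reference width → Pre_highlight_sequence_py sequence reference width → Spec_highlight_sequence_py sequence reference width (highlight_sequence_py sequence reference width)

-- ===== LEMMAS AND PROOFS =====

-- the per-character piece and the per-chunk line both ports build
def pvPiece (q : Char × Char) : List Char := if q.1 = q.2 then [q.1] else pvSpanOf q.1
def pvLine (l : List (Char × Char)) : List Char := (l.map pvPiece).flatten

-- chunks of size n (for n ≥ 1 this is take n :: chunks of drop n)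
def pvChunks {α : Type} (n : Nat) : List α → List (List α)
  | [] => []
  | x :: t => (x :: t.take (n - 1)) :: pvChunks n (t.drop (n - 1))
  termination_by l => l.length
  decreasing_by simp

theorem pvChunks_nil {α : Type} (n : Nat) : pvChunks n ([] : List α) = [] := by
  simp [pvChunks]

theorem pvChunks_cons {α : Type} {n : Nat} (hn : 1 ≤ n) (x : α) (t : List α) :
    pvChunks n (x :: t) = (x :: t).take n :: pvChunks n ((x :: t).drop n) := by
  obtain ⟨m, rfl⟩ : ∃ m, n = m + 1 := ⟨n - 1, by omega⟩
  rw [pvChunks.eq_def]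
  simp

theorem pvJoin_nil_flatten (xs : List (List Char)) : PySem.Chars.join [] xs = xs.flatten := by
  induction xs with
  | nil => simp [PySem.Chars.join_nil]
  | cons p rest ih =>
    cases rest with
    | nil => simp [PySem.Chars.join_singleton]
    | cons q r => rw [PySem.Chars.join_cons_cons]; simp at ih ⊢; exact ih

-- range(0, L, w) for w > 0, L > 0 starts at 0 and continues shifted by w
theorem pvRange_shift (w L : Int) (hw : 0 < w) (hL : 0 < L) :
    PySem.List.pyRange 0 L w = 0 :: (PySem.List.pyRange 0 (L - w) w).map (· + w) := by
  rw [PySem.List.pyRange_of_pos 0 L hw, PySem.List.pyRange_of_pos 0 (L - w) hw,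
    if_pos (by omega : (0:Int) < L)]
  by_cases hLw : (0:Int) < L - w
  · rw [if_pos hLw]
    have e1 : L - 0 + w - 1 = (L - w - 0 + w - 1) + 1 * w := by ring
    rw [e1, Int.add_mul_ediv_right _ 1 (by omega : w ≠ 0)]
    have hq : 0 ≤ (L - w - 0 + w - 1) / w := Int.ediv_nonneg (by omega) (by omega)
    rw [Int.toNat_add hq (by norm_num), Int.toNat_one]
    rw [List.range_succ_eq_map]
    simp only [List.map_cons, List.map_map, Nat.cast_zero, mul_zero, add_zero]
    congr 1
    apply List.map_congr_left
    intro k _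
    simp only [Function.comp]
    push_cast
    ring
  · rw [if_neg hLw]
    have hq : (L - 0 + w - 1) / w = 1 := by
      have h1 : 1 ≤ (L - 0 + w - 1) / w := by rw [Int.le_ediv_iff_mul_le hw]; omega
      have h2 : (L - 0 + w - 1) / w < 2 := by rw [Int.ediv_lt_iff_lt_mul hw]; omega
      omega
    rw [hq]
    simp

theorem pvRange_nonpos (w L : Int) (hw : 0 < w) (hL : L ≤ 0) :
    PySem.List.pyRange 0 L w = [] := by
  rw [PySem.List.pyRange_of_pos 0 L hw, if_neg (by omega)]
  simp

-- _wrap_sequence computes the size-n chunks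
theorem pvWrap_eq_chunks (n : Nat) (hn : 1 ≤ n) :
    ∀ (N : Nat) (s : List Char), s.length ≤ N → pvWrap s (n : Int) = pvChunks n s := by
  have hw : (0:Int) < n := by exact_mod_cast hn
  intro N
  induction N with
  | zero =>
    intro s hs
    have hs0 : s = [] := List.eq_nil_of_length_eq_zero (by omega)
    subst hs0
    unfold pvWrap
    rw [pvRange_nonpos _ _ hw (by simp)]
    simp [pvChunks_nil]
  | succ N ih =>
    intro s hs
    cases s with
    | nil =>
      unfold pvWrap
      rw [pvRange_nonpos _ _ hw (by simp)]
      simp [pvChunks_nil]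
    | cons x t =>
      have hL : (0:Int) < ((x :: t).length : Int) := by
        simp [List.length_cons]
      unfold pvWrap
      rw [pvRange_shift _ _ hw hL, List.map_cons, List.map_map]
      have hhead : PySem.List.slice (x :: t) (some 0) (some (0 + (n : Int))) = (x :: t).take n := by
        have h := PySem.List.slice_natCast_add (x :: t) 0 n
        simpa using h
      rw [hhead, pvChunks_cons hn]
      congr 1
      by_cases hle : (x :: t).length ≤ n
      · rw [pvRange_nonpos _ _ hw (by omega)]
        rw [List.drop_eq_nil_of_le hle, pvChunks_nil]
        simp
      · simp only [not_le] at hle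
        have e : ((x :: t).length : Int) - n = (((x :: t).length - n : Nat) : Int) := by
          omega
        rw [e]
        have hmap : ∀ i ∈ PySem.List.pyRange 0 (((x :: t).length - n : Nat) : Int) (n : Int),
            ((fun i => PySem.List.slice (x :: t) (some i) (some (i + n))) ∘ (· + (n : Int))) i
              = (fun i => PySem.List.slice ((x :: t).drop n) (some i) (some (i + n))) i := by
          intro i hi
          have h0 : 0 ≤ i := ((PySem.List.mem_pyRange_iff_of_pos hw i).1 hi).1
          obtain ⟨m, rfl⟩ : ∃ m : Nat, (m : Int) = i := ⟨i.toNat, Int.toNat_of_nonneg h0⟩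
          simp only [Function.comp]
          rw [PySem.List.slice_natCast_add ((x :: t).drop n) m n, List.drop_drop]
          have e2 : ((m : Int) + n) + n = ((m + n : Nat) : Int) + n := by push_cast; ring
          have e1 : (m : Int) + n = ((m + n : Nat) : Int) := by push_cast; ring
          rw [e2, e1, PySem.List.slice_natCast_add, Nat.add_comm m n]
        rw [List.map_congr_left hmap]
        have hlen : (((x :: t).length - n : Nat) : Int) = ((((x :: t).drop n).length : Nat) : Int) := by
          simp
        rw [hlen]
        have hrec := ih ((x :: t).drop n)
          (by simp only [List.length_drop, List.length_cons] at *; omega)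
        unfold pvWrap at hrec
        exact hrec

-- chunking commutes with zip
theorem pvChunks_zip (n : Nat) (hn : 1 ≤ n) :
    ∀ (N : Nat) (a b : List Char), a.length ≤ N →
      ((pvChunks n a).zip (pvChunks n b)).map (fun p => p.1.zip p.2) = pvChunks n (a.zip b) := by
  intro N
  induction N with
  | zero =>
    intro a b ha
    have : a = [] := List.eq_nil_of_length_eq_zero (by omega)
    subst this
    simp [pvChunks_nil]
  | succ N ih =>
    intro a b ha
    cases a with
    | nil => simp [pvChunks_nil]
    | cons x t =>
      cases b with
      | nil => simp [pvChunks_nil]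
      | cons y u =>
        rw [pvChunks_cons hn x t, pvChunks_cons hn y u,
          show (x :: t).zip (y :: u) = (x, y) :: t.zip u from rfl,
          pvChunks_cons hn (x, y) (t.zip u)]
        simp only [List.zip_cons_cons, List.map_cons]
        congr 1
        · rw [show ((x, y) :: t.zip u) = (x :: t).zip (y :: u) from rfl]
          simp only [List.zip_eq_zipWith, List.take_zipWith]
        · rw [show ((x, y) :: t.zip u) = (x :: t).zip (y :: u) from rfl]
          rw [show ((x :: t).zip (y :: u)).drop n = ((x :: t).drop n).zip ((y :: u).drop n) from by
            simp only [List.zip_eq_zipWith, List.drop_zipWith]]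
          exact ih ((x :: t).drop n) ((y :: u).drop n)
            (by simp only [List.length_drop, List.length_cons] at *; omega)

-- a run of indices with no line break is mapped straight through
theorem pvAltGo_no_break (w : Int) :
    ∀ (l t : List (Char × Char)) (k : Nat),
      (∀ j, j < l.length → ¬(0 < k + j ∧ PySem.Int.mod ((k + j : Nat) : Int) w = 0)) →
      pvAltGo w k (l ++ t) = l.map pvPiece ++ pvAltGo w (k + l.length) t := by
  intro l
  induction l with
  | nil => intro t k _; simp
  | cons x l ih =>
    intro t k h
    obtain ⟨b, r⟩ := x
    have h0 := h 0 (by simp)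
    simp only [List.cons_append, pvAltGo]
    rw [if_neg (by simp at h0 ⊢; exact h0)]
    have hk : ∀ j, j < l.length → ¬(0 < (k + 1) + j ∧ PySem.Int.mod (((k + 1) + j : Nat) : Int) w = 0) := by
      intro j hj
      have h' := h (j + 1) (by simp; omega)
      have e : k + (j + 1) = (k + 1) + j := by omega
      rw [e] at h'
      exact h'
    rw [ih t (k + 1) hk]
    have e2 : k + 1 + l.length = k + (l.length + 1) := by omega
    rw [e2]
    simp [pvPiece]

theorem pvMod_iff (n k : Nat) (hn : 1 ≤ n) :
    (0 < k ∧ PySem.Int.mod (k : Int) (n : Int) = 0) ↔ (k ≠ 0 ∧ n ∣ k) := by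
  rw [PySem.Int.mod_eq_zero_iff_dvd, Int.natCast_dvd_natCast]
  omega

-- the flat pass, started at any multiple of n, produces the chunked lines joined by "<br>"
theorem pvAltGo_chunks (n : Nat) (hn : 1 ≤ n) :
    ∀ (N : Nat) (ps : List (Char × Char)) (k : Nat), ps.length ≤ N → n ∣ k →
      (pvAltGo (n : Int) k ps).flatten =
        (if k ≠ 0 ∧ ps ≠ [] then "<br>".toList else []) ++
          PySem.Chars.join "<br>".toList ((pvChunks n ps).map pvLine) := by
  intro N
  induction N with
  | zero =>
    intro ps k hlen _
    have : ps = [] := List.eq_nil_of_length_eq_zero (by omega)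
    subst this
    simp [pvAltGo, pvChunks_nil, PySem.Chars.join_nil]
  | succ N ih =>
    intro ps k hlen hdvd
    cases ps with
    | nil => simp [pvAltGo, pvChunks_nil, PySem.Chars.join_nil]
    | cons x rest =>
      obtain ⟨b, r⟩ := x
      -- the break written at the head of a chunk fires exactly when k ≠ 0
      have hbrk : (if 0 < k ∧ PySem.Int.mod (k : Int) (n : Int) = 0 then (["<br>".toList] : List (List Char)) else [])
          = if k ≠ 0 then ["<br>".toList] else [] := by
        by_cases hk : k = 0
        · subst hk; simp
        · rw [if_pos ((pvMod_iff n k hn).2 ⟨hk, hdvd⟩ |> fun h => ⟨by omega, h.2⟩), if_pos hk]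
      have hsplit : rest = rest.take (n - 1) ++ rest.drop (n - 1) := (List.take_append_drop _ _).symm
      conv_lhs => rw [show ((b, r) :: rest) = (b, r) :: (rest.take (n - 1) ++ rest.drop (n - 1)) from by rw [← hsplit]]
      simp only [pvAltGo]
      rw [pvAltGo_no_break (n : Int) (rest.take (n - 1)) (rest.drop (n - 1)) (k + 1) ?cond]
      case cond =>
        intro j hj hcontra
        have hjn : j < n - 1 := by
          simp [List.length_take] at hj
          omega
        obtain ⟨-, hd2⟩ := (pvMod_iff n (k + 1 + j) hn).1 hcontra
        have hd3 : n ∣ (1 + j) := by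
          have h4 := Nat.dvd_sub hd2 hdvd
          rwa [show k + 1 + j - k = 1 + j from by omega] at h4
        have := Nat.le_of_dvd (by omega) hd3
        omega
      rw [hbrk]
      have hchunks : pvChunks n ((b, r) :: rest)
          = ((b, r) :: rest.take (n - 1)) :: pvChunks n (rest.drop (n - 1)) := by
        rw [pvChunks_cons hn]
        obtain ⟨m, rfl⟩ : ∃ m, n = m + 1 := ⟨n - 1, by omega⟩
        simp
      rw [hchunks]
      by_cases htn : rest.drop (n - 1) = []
      · rw [htn, pvChunks_nil]
        simp only [List.map_cons, List.map_nil]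
        rw [PySem.Chars.join_singleton]
        by_cases hk : k = 0 <;>
          simp [hk, pvAltGo, pvLine, pvPiece]
      · have hrl : (n - 1) < rest.length := by
          by_contra hcon
          exact htn (List.drop_eq_nil_of_le (by omega))
        have hlenl : (rest.take (n - 1)).length = n - 1 := by
          simp [List.length_take]; omega
        rw [hlenl, show k + 1 + (n - 1) = k + n from by omega]
        have hreck := ih (rest.drop (n - 1)) (k + n)
          (by simp [List.length_drop] at *; omega) (dvd_add hdvd dvd_rfl)
        have hjoin : PySem.Chars.join "<br>".toList
            ((((b, r) :: rest.take (n - 1)) :: pvChunks n (rest.drop (n - 1))).map pvLine)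
            = pvLine ((b, r) :: rest.take (n - 1)) ++ "<br>".toList ++
              PySem.Chars.join "<br>".toList ((pvChunks n (rest.drop (n - 1))).map pvLine) := by
          obtain ⟨z, zs, hz⟩ : ∃ z zs, rest.drop (n - 1) = z :: zs := by
            cases h : rest.drop (n - 1) with
            | nil => exact absurd h htn
            | cons z zs => exact ⟨z, zs, rfl⟩
          rw [hz, pvChunks_cons hn]
          simp only [List.map_cons]
          rw [PySem.Chars.join_cons_cons]
        rw [hjoin]
        simp only [List.flatten_append, List.flatten_cons]
        rw [hreck]
        have hcond : (k + n ≠ 0 ∧ rest.drop (n - 1) ≠ []) := ⟨by omega, htn⟩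
        rw [if_pos hcond]
        by_cases hk : k = 0 <;>
          simp [hk, pvLine, pvPiece, List.append_assoc]

-- ===== VERDICT (by name: the statement is the Claim_ definition above) =====
theorem highlight_sequence_py_spec : Claim_equal_highlight_sequence_py := by
  intro sequence reference width _ hpre
  unfold Pre_highlight_sequence_py at hpre
  unfold Spec_highlight_sequence_py
  lift width to Nat using (by omega : (0:Int) ≤ width) with n
  have hn : 1 ≤ n := by exact_mod_cast hpre
  set a := sequence.toList with ha
  set b := reference.toList with hb
  have hA : highlight_sequence_py sequence reference (n : Int) =
      String.mk (PySem.Chars.join "<br>".toList ((pvChunks n (a.zip b)).map pvLine)) := by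
    unfold highlight_sequence_py
    rw [← ha, ← hb, pvWrap_eq_chunks n hn a.length a le_rfl, pvWrap_eq_chunks n hn b.length b le_rfl]
    congr 1
    rw [← pvChunks_zip n hn a.length a b le_rfl, List.map_map]
    congr 1
    apply List.map_congr_left
    intro p _
    simp only [Function.comp]
    rw [pvJoin_nil_flatten]
    rfl
  have hB : highlight_sequence_py_alt sequence reference (n : Int) =
      String.mk (PySem.Chars.join "<br>".toList ((pvChunks n (a.zip b)).map pvLine)) := by
    unfold highlight_sequence_py_alt
    rw [← ha, ← hb, pvJoin_nil_flatten]
    rw [pvAltGo_chunks n hn (a.zip b).length (a.zip b) 0 le_rfl (dvd_zero n)]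
    simp
  rw [hA, hB]
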